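-- pv_equiv track=rewrite | github.com/Aleex87/task_planner_agent | tools.py | prioritize_tasks
-- ===== SOURCE A (Python) =====
-- def prioritize_tasks(tasks: list[str]) -> list[str]:
--     """
--     Order tasks based on simple priority rules.
--     """
--
--     priority_keywords = [
--         "define",
--         "collect",
--         "list",
--         "break",
--         "create",
--         "start",
--         "review",
--         "test",
--     ]
--
--     def task_priority(task: str) -> int:
--         task_lower = task.lower()
--         for index, keyword in enumerate(priority_keywords):
--             if keyword in task_lower:
--                 return index
--         return len(priority_keywords)
--
--     return sorted(tasks, key=task_priority)
-- ===== SOURCE B (Python) =====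
-- def prioritize_tasks(tasks: list[str]) -> list[str]:
--     """
--     Order tasks based on simple priority rules.
--     """
--
--     priority_keywords = [
--         "define",
--         "collect",
--         "list",
--         "break",
--         "create",
--         "start",
--         "review",
--         "test",
--     ]
--
--     ordered = []
--     for index, keyword in enumerate(priority_keywords):
--         for task in tasks:
--             task_lower = task.lower()
--             if keyword in task_lower and not any(
--                 k in task_lower for k in priority_keywords[:index]
--             ):
--                 ordered.append(task)
--     for task in tasks:
--         if not any(k in task.lower() for k in priority_keywords):
--             ordered.append(task)
--     return ordered
-- ===== Notes on version B (the rewrite author's own statement) =====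
-- stated objective: alternative
-- what changed: Replaces sorted(tasks, key=task_priority) with nine stable selection passes: for each keyword in priority order, append (in input order) the tasks whose first matching keyword is that one, then a final pass appends the tasks matching no keyword.
import Mathlib
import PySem

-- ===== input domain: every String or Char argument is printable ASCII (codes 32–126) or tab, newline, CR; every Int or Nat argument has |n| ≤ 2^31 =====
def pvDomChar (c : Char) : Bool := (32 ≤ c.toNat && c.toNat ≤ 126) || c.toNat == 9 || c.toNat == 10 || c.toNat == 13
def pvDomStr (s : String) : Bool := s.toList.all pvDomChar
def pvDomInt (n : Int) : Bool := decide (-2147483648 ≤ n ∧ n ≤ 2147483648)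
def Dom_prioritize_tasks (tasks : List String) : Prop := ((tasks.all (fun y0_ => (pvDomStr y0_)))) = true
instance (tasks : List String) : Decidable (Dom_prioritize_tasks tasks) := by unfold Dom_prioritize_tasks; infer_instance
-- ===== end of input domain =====

-- B replaces the comparison sort with nine stable selection passes, one per priority class (objective: alternative).

-- ===== PORT A =====
def priority_keywords : List String :=
  ["define", "collect", "list", "break", "create", "start", "review", "test"]

-- the 'for index, keyword in enumerate(priority_keywords)' loop of task_priority
def taskPriorityGo (task_lower : String) : List String → Int → Int
  | [], _ => (priority_keywords.length : Int)
  | keyword :: rest, index =>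
      if PySem.Str.isIn keyword task_lower then index
      else taskPriorityGo task_lower rest (index + 1)

def task_priority (task : String) : Int :=
  taskPriorityGo (PySem.Str.lower task) priority_keywords 0

def prioritize_tasks (tasks : List String) : List String :=
  PySem.List.sorted tasks task_priority

-- ===== PORT B =====
def kw_list : List String :=
  ["define", "collect", "list", "break", "create", "start", "review", "test"]

-- one pass per keyword: pick the tasks whose FIRST matching keyword is this one,
-- in original order; a last pass picks the tasks matching no keyword
def prioritize_tasks_alt (tasks : List String) : List String :=
  let ordered := (PySem.List.enumerate kw_list).foldl
    (fun ordered ik =>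
      tasks.foldl (fun ordered task =>
        let task_lower := PySem.Str.lower task
        if PySem.Str.isIn ik.2 task_lower &&
            !((PySem.List.slice kw_list none (some ik.1)).any
                (fun k => PySem.Str.isIn k task_lower)) then
          ordered ++ [task]
        else ordered) ordered)
    []
  tasks.foldl (fun ordered task =>
    if !(kw_list.any (fun k => PySem.Str.isIn k (PySem.Str.lower task))) then
      ordered ++ [task]
    else ordered) ordered

-- ===== PRECONDITION & SPEC =====
def Spec_prioritize_tasks (tasks : List String) (out : List String) : Prop := out = prioritize_tasks_alt tasks
instance (tasks : List String) (out : List String) : Decidable (Spec_prioritize_tasks tasks out) := by unfold Spec_prioritize_tasks; infer_instance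

-- ===== CLAIM (what is proved, stated in full; the proofs are below) =====
def Claim_equal_prioritize_tasks : Prop := ∀ (tasks : List String), Dom_prioritize_tasks tasks → Spec_prioritize_tasks tasks (prioritize_tasks tasks)

-- ===== LEMMAS AND PROOFS =====

-- the canonical bucketed form both ports are reduced to
def bucketsForm (xs : List String) : List String :=
  (List.range 9).flatMap (fun i => xs.filter (fun t => (task_priority t).toNat = i))

lemma taskPriorityGo_nonneg (tl : String) :
    ∀ (ks : List String) (i : Int), 0 ≤ i → 0 ≤ taskPriorityGo tl ks i := by
  intro ks
  induction ks with
  | nil => intro i _; simp [taskPriorityGo, priority_keywords]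
  | cons k rest ih =>
      intro i hi
      simp only [taskPriorityGo]
      split
      · exact hi
      · exact ih (i + 1) (by omega)

lemma taskPriorityGo_lt (tl : String) :
    ∀ (ks : List String) (i : Int), i + ks.length ≤ 9 → taskPriorityGo tl ks i < 9 := by
  intro ks
  induction ks with
  | nil => intro i _; simp [taskPriorityGo, priority_keywords]
  | cons k rest ih =>
      intro i hi
      simp only [taskPriorityGo]
      split
      · simp at hi; omega
      · exact ih (i + 1) (by simp at hi ⊢; omega)

lemma key_bounds (t : String) : 0 ≤ task_priority t ∧ task_priority t < 9 :=
  ⟨taskPriorityGo_nonneg _ _ 0 le_rfl,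
   taskPriorityGo_lt _ _ 0 (by simp [priority_keywords])⟩

lemma key_toNat_eq (t : String) (i : Nat) :
    ((task_priority t).toNat = i) ↔ (task_priority t = (i : Int)) := by
  have h := (key_bounds t).1; omega

-- insertBy lands exactly between a prefix it never goes before and a suffix it always goes before
lemma insertBy_middle {α : Type} (before : α → α → Bool) (x : α) :
    ∀ (pre suf : List α), (∀ y ∈ pre, before x y = false) → (∀ y ∈ suf, before x y = true) →
    PySem.List.insertBy before x (pre ++ suf) = pre ++ [x] ++ suf := by
  intro pre
  induction pre with
  | nil =>
      intro suf _ hsuf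
      cases suf with
      | nil => simp [PySem.List.insertBy]
      | cons y ys => simp [PySem.List.insertBy, hsuf y (by simp)]
  | cons z pre ih =>
      intro suf hpre hsuf
      simp only [List.cons_append, PySem.List.insertBy, hpre z (by simp)]
      simp [ih suf (fun y hy => hpre y (by simp [hy])) hsuf]

lemma flatMap_range_split {α : Type} (f : Nat → List α) (n p : Nat) (hp : p < n) :
    (List.range n).flatMap f
      = (List.range (p + 1)).flatMap f ++ (List.range' (p + 1) (n - p - 1)).flatMap f := by
  have h : List.range n = List.range (p + 1) ++ List.range' (p + 1) (n - p - 1) := by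
    rw [List.range_eq_range', List.range_eq_range']
    have h2 := @List.range'_append 0 (p + 1) (n - p - 1) 1
    simp only [Nat.one_mul, Nat.zero_add] at h2
    conv_lhs => rw [show n = (p + 1) + (n - p - 1) from by omega]
    rw [← h2]
  rw [h, List.flatMap_append]

lemma insertBy_buckets (key : String → Int) (x : String) (p n : Nat)
    (hp : key x = (p : Int)) (hpn : p < n) (f : Nat → List String)
    (hf : ∀ i, i < n → ∀ y ∈ f i, key y = (i : Int)) :
    PySem.List.insertBy (fun a b => decide (key a < key b)) x ((List.range n).flatMap f)
      = (List.range n).flatMap (fun i => f i ++ if i = p then [x] else []) := by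
  rw [flatMap_range_split f n p hpn,
      flatMap_range_split (fun i => f i ++ if i = p then [x] else []) n p hpn]
  rw [insertBy_middle _ x _ _ ?hpre ?hsuf]
  case hpre =>
    intro y hy
    obtain ⟨i, hi, hyi⟩ := List.mem_flatMap.1 hy
    have hi' : i < p + 1 := List.mem_range.1 hi
    have := hf i (by omega) y hyi
    simp [this, hp]; omega
  case hsuf =>
    intro y hy
    obtain ⟨i, hi, hyi⟩ := List.mem_flatMap.1 hy
    have hi' : p + 1 ≤ i ∧ i < n := by
      have := List.mem_range'.1 hi; omega
    have := hf i (by omega) y hyi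
    simp [this, hp]; omega
  congr 1
  · -- left part: bucket p gets x appended at its end
    rw [List.range_succ, List.flatMap_append, List.flatMap_append]
    simp only [List.flatMap_cons, List.flatMap_nil]
    have : (List.range p).flatMap (fun i => f i ++ if i = p then [x] else [])
        = (List.range p).flatMap f := by
      apply List.flatMap_congr
      intro i hi
      have : i ≠ p := by have := List.mem_range.1 hi; omega
      simp [this]
    rw [this]; simp
  · -- right part: no bucket there is p
    apply List.flatMap_congr
    intro i hi
    have : p + 1 ≤ i := by have := List.mem_range'.1 hi; omega
    have : i ≠ p := by omega
    simp [this]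

lemma sorted_eq_bucketsForm (xs : List String) :
    PySem.List.sorted xs task_priority = bucketsForm xs := by
  induction xs using List.reverseRecOn with
  | nil => simp [bucketsForm, PySem.List.sorted]
  | append_singleton xs x ih =>
      rw [PySem.List.sorted_eq_foldl_insertBy, List.foldl_append,
          ← PySem.List.sorted_eq_foldl_insertBy, ih]
      simp only [List.foldl_cons, List.foldl_nil]
      unfold bucketsForm
      rw [insertBy_buckets task_priority x (task_priority x).toNat 9
            (by have := (key_bounds x).1; omega)
            (by have := (key_bounds x).2; have := (key_bounds x).1; omega)
            _ ?hf]
      case hf =>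
        intro i hi y hy
        have := (List.mem_filter.1 hy).2
        simpa [key_toNat_eq] using this
      apply List.flatMap_congr
      intro i hi
      rw [List.filter_append]
      congr 1
      by_cases h : (task_priority x).toNat = i
      · simp [h]
      · simp [List.filter, h, Ne.symm h]

-- B-side characterisation: position of the first matching keyword
def natPrio (tl : String) : List String → Nat
  | [] => 0
  | k :: rest => if PySem.Str.isIn k tl then 0 else natPrio tl rest + 1

lemma go_eq_natPrio (tl : String) :
    ∀ (ks : List String) (off : Int), off + ks.length = 8 →
      taskPriorityGo tl ks off = off + natPrio tl ks := by
  intro ks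
  induction ks with
  | nil =>
      intro off h
      simp only [taskPriorityGo, priority_keywords, natPrio]
      simp at h ⊢; omega
  | cons k rest ih =>
      intro off h
      simp only [taskPriorityGo, natPrio]
      split
      · simp
      · rw [ih (off + 1) (by simp at h ⊢; omega)]
        push_cast; ring

lemma task_priority_eq_natPrio (t : String) :
    (task_priority t).toNat = natPrio (PySem.Str.lower t) priority_keywords := by
  have h := go_eq_natPrio (PySem.Str.lower t) priority_keywords 0 (by simp [priority_keywords])
  unfold task_priority
  rw [h]
  simp

lemma cond_iff (tl : String) :
    ∀ (ks : List String) (i : Nat), i < ks.length →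
      ((PySem.Str.isIn (ks.getD i "") tl) &&
        !((ks.take i).any (fun k => PySem.Str.isIn k tl)))
        = decide (natPrio tl ks = i) := by
  intro ks
  induction ks with
  | nil => intro i hi; simp at hi
  | cons k rest ih =>
      intro i hi
      cases i with
      | zero =>
          cases h : PySem.Chars.isIn k.toList tl.toList <;>
            simp [natPrio, PySem.Str.isIn, h]
      | succ i =>
          have hih := ih i (by simpa using hi)
          simp only [PySem.Str.isIn, List.getD_eq_getElem?_getD] at hih
          cases h : PySem.Chars.isIn k.toList tl.toList <;>
            simp [natPrio, PySem.Str.isIn, h, hih, List.getD_eq_getElem?_getD]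

lemma nomatch_iff (tl : String) :
    ∀ (ks : List String),
      (!(ks.any (fun k => PySem.Str.isIn k tl))) = decide (natPrio tl ks = ks.length) := by
  intro ks
  induction ks with
  | nil => simp [natPrio]
  | cons k rest ih =>
      have hih := ih
      simp only [PySem.Str.isIn] at hih
      cases h : PySem.Chars.isIn k.toList tl.toList <;>
        simp [natPrio, PySem.Str.isIn, h, hih]

lemma enumerate_kw_list :
    PySem.List.enumerate kw_list
      = (List.range 8).map (fun (i : Nat) => ((i : Int), kw_list.getD i "")) := by decide

lemma buckets_split (xs : List String) :
    bucketsForm xs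
      = (List.range 8).flatMap (fun i => xs.filter (fun t => (task_priority t).toNat = i))
        ++ xs.filter (fun t => (task_priority t).toNat = 8) := by
  unfold bucketsForm
  rw [show (9 : Nat) = 8 + 1 from rfl, List.range_succ, List.flatMap_append]
  simp

lemma alt_eq_bucketsForm (xs : List String) :
    prioritize_tasks_alt xs = bucketsForm xs := by
  unfold prioritize_tasks_alt
  simp only [PySem.List.foldl_append_if_eq_filter, PySem.List.foldl_append_eq_flatMap,
    List.nil_append, enumerate_kw_list, List.flatMap_map]
  rw [buckets_split]
  refine congrArg₂ (· ++ ·) ?_ ?_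
  · apply List.flatMap_congr
    intro i hi
    have hi8 : i < 8 := List.mem_range.1 hi
    apply List.filter_congr
    intro t _
    rw [PySem.List.slice_to_natCast,
        cond_iff (PySem.Str.lower t) kw_list i (by simpa [kw_list] using hi8),
        task_priority_eq_natPrio, show kw_list = priority_keywords from rfl]
  · apply List.filter_congr
    intro t _
    rw [nomatch_iff, task_priority_eq_natPrio]
    simp [kw_list, priority_keywords]

-- ===== VERDICT (by name: the statement is the Claim_ definition above) =====
theorem prioritize_tasks_spec : Claim_equal_prioritize_tasks := by
  intro tasks _
  unfold Spec_prioritize_tasks prioritize_tasks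
  rw [alt_eq_bucketsForm, sorted_eq_bucketsForm]
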